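-- pv_equiv track=rewrite | github.com/Madhax/Kata | binarysearch-contests/weekly-41/1.py | solve
-- ===== SOURCE A (Python) =====
-- def solve(nums):
--
--     iter = 0
--     foundOne = False
--     EndOfOne = False
--     while iter < len(nums):
--         if not EndOfOne and nums[iter] == 1:
--             foundOne = True
--
--         elif foundOne and not EndOfOne and nums[iter] != 1:
--             EndOfOne = True
--
--         elif nums[iter] == 1 and EndOfOne:
--             return False
--
--         iter += 1
--
--     return True
-- ===== SOURCE B (Python) =====
-- def solve(nums):
--     ones = [i for i, x in enumerate(nums) if x == 1]
--     return (not ones) or (ones[-1] - ones[0] + 1 == len(ones))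
-- ===== Notes on version B (the rewrite author's own statement) =====
-- stated objective: simpler
-- what changed: Replaces A's three-flag while-loop state machine with a one-line index-collection pass plus a closed-form span-vs-count check on the positions of the 1s.
import Mathlib
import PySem

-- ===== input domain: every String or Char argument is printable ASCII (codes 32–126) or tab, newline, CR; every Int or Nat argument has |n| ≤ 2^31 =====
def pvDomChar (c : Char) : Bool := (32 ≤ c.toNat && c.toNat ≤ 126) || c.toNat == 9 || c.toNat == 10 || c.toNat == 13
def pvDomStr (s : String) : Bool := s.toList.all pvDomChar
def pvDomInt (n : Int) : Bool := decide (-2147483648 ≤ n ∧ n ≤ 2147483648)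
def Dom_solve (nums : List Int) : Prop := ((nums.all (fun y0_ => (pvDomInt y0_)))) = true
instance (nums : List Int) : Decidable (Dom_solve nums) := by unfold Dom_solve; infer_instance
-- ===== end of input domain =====

-- B replaces A's three-flag state machine with an index-collection pass and a
-- span-vs-count check; objective: simpler.

-- ===== PORT A =====
-- A's while loop over `iter` with flags foundOne/EndOfOne, transliterated as a
-- structural recursion over the list carrying the same two flags; the early
-- `return False` becomes the `false` branch.
def solveLoopA : List Int → Bool → Bool → Bool
  | [], _, _ => true
  | x :: xs, foundOne, endOfOne =>
    if !endOfOne && x == 1 then solveLoopA xs true endOfOne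
    else if foundOne && !endOfOne && !(x == 1) then solveLoopA xs foundOne true
    else if x == 1 && endOfOne then false
    else solveLoopA xs foundOne endOfOne

def solve (nums : List Int) : Bool := solveLoopA nums false false

-- ===== PORT B =====
-- ones = [i for i, x in enumerate(nums) if x == 1];
-- return (not ones) or (ones[-1] - ones[0] + 1 == len(ones))
-- (ones[-1] / ones[0] are read under the nonemptiness guard, so getLastD/headD are exact)
def solve_alt (nums : List Int) : Bool :=
  let ones := ((PySem.List.enumerate nums).filter (fun p => p.2 == 1)).map (fun p => p.1)
  if ones.isEmpty then true
  else ones.getLastD 0 - ones.headD 0 + 1 == (ones.length : Int)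

-- ===== PRECONDITION & SPEC =====
def Spec_solve (nums : List Int) (out : Bool) : Prop := out = solve_alt nums
instance (nums : List Int) (out : Bool) : Decidable (Spec_solve nums out) := by unfold Spec_solve; infer_instance

-- ===== CLAIM (what is proved, stated in full; the proofs are below) =====
def Claim_equal_solve : Prop := ∀ (nums : List Int), Dom_solve nums → Spec_solve nums (solve nums)

-- ===== LEMMAS AND PROOFS =====

-- indices (from offset k) of the elements equal to 1
def gOnes : List Int → Int → List Int
  | [], _ => []
  | x :: xs, k => if x == 1 then k :: gOnes xs (k + 1) else gOnes xs (k + 1)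

-- B's span-vs-count check, on an explicit index list
def consecB (l : List Int) : Bool :=
  if l.isEmpty then true else l.getLastD 0 - l.headD 0 + 1 == (l.length : Int)

-- "the last index equals count - 1" (for lists starting at 0: no gaps)
def lastIsLen (l : List Int) : Bool :=
  if l.isEmpty then true else l.getLastD 0 == (l.length : Int) - 1

theorem gOnes_cons_one (x : Int) (xs : List Int) (k : Int) (h : x = 1) :
    gOnes (x :: xs) k = k :: gOnes xs (k + 1) := by simp [gOnes, h]

theorem gOnes_cons_ne (x : Int) (xs : List Int) (k : Int) (h : ¬ x = 1) :
    gOnes (x :: xs) k = gOnes xs (k + 1) := by simp [gOnes, h]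

theorem one_mem_cons_ne (x : Int) (xs : List Int) (h : ¬ x = 1) :
    (1 : Int) ∈ x :: xs ↔ (1 : Int) ∈ xs := by
  simp [List.mem_cons, show ¬((1 : Int) = x) from fun he => h he.symm]

theorem gOnes_eq_filter (xs : List Int) (k : Int) :
    ((PySem.List.enumerate xs k).filter (fun p => p.2 == 1)).map (fun p => p.1) = gOnes xs k := by
  induction xs generalizing k with
  | nil => simp [PySem.List.enumerate_nil, gOnes]
  | cons x xs ih =>
    simp only [PySem.List.enumerate_cons, List.filter_cons, gOnes]
    by_cases h : x = 1 <;> simp [h, ih]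

theorem gOnes_shift (xs : List Int) (k : Int) :
    gOnes xs (k + 1) = (gOnes xs k).map (· + 1) := by
  induction xs generalizing k with
  | nil => simp [gOnes]
  | cons x xs ih =>
    by_cases h : x = 1 <;> simp [gOnes, h, ih (k + 1)]

theorem gOnes_nil_iff (xs : List Int) (k : Int) :
    gOnes xs k = [] ↔ (1 : Int) ∉ xs := by
  induction xs generalizing k with
  | nil => simp [gOnes]
  | cons x xs ih =>
    by_cases h : x = 1
    · simp [gOnes, h]
    · rw [gOnes_cons_ne x xs k h, ih (k + 1)]
      exact not_congr (one_mem_cons_ne x xs h).symm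

-- getLastD of an index-shifted list, in the form simp's getLastD_cons produces
theorem getLastD_map_add (l : List Int) (a : Int) :
    (l.map (· + 1)).getLastD (a + 1) = l.getLastD a + 1 := by
  induction l generalizing a with
  | nil => simp
  | cons b l ih =>
    rw [List.map_cons, List.getLastD_cons, List.getLastD_cons]
    exact ih b

-- the last index is at least k + count - 1 (indices increase from k)
theorem gOnes_last_ge (xs : List Int) (d : Int) (k : Int) (h : gOnes xs k ≠ []) :
    k + ((gOnes xs k).length : Int) - 1 ≤ (gOnes xs k).getLastD d := by
  induction xs generalizing k with
  | nil => simp [gOnes] at h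
  | cons x xs ih =>
    by_cases hx : x = 1
    · rw [gOnes_cons_one x xs k hx] at h ⊢
      rcases h' : gOnes xs (k + 1) with _ | ⟨b, l⟩
      · simp
      · have := ih (k + 1) (by simp [h'])
        rw [h'] at this
        simp only [List.getLastD_cons, List.length_cons] at this ⊢
        push_cast at this ⊢
        omega
    · rw [gOnes_cons_ne x xs k hx] at h ⊢
      have := ih (k + 1) h
      omega

theorem consecB_shift (l : List Int) : consecB (l.map (· + 1)) = consecB l := by
  rcases l with _ | ⟨a, l⟩
  · simp [consecB]
  · simp only [consecB, List.map_cons, List.isEmpty_cons, List.headD_cons, List.length_cons,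
      List.length_map, List.getLastD_cons, Bool.false_eq_true, if_false]
    rw [getLastD_map_add l a, Bool.eq_iff_iff]
    simp only [beq_iff_eq]
    omega

theorem consecB_zero_cons (l : List Int) : consecB (0 :: l.map (· + 1)) = lastIsLen l := by
  rcases l with _ | ⟨a, l⟩
  · simp [consecB, lastIsLen]
  · simp only [consecB, lastIsLen, List.map_cons, List.isEmpty_cons, List.headD_cons,
      List.length_cons, List.length_map, List.getLastD_cons, Bool.false_eq_true, if_false]
    rw [show ((l.map (· + 1)).getLastD (a + 1)) = l.getLastD a + 1 from getLastD_map_add l a,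
      Bool.eq_iff_iff]
    simp only [beq_iff_eq]
    push_cast
    omega

theorem lastIsLen_zero_cons (l : List Int) : lastIsLen (0 :: l.map (· + 1)) = lastIsLen l := by
  rcases l with _ | ⟨a, l⟩
  · simp [lastIsLen]
  · simp only [lastIsLen, List.map_cons, List.isEmpty_cons, List.length_cons, List.length_map,
      List.getLastD_cons, Bool.false_eq_true, if_false]
    rw [getLastD_map_add l a, Bool.eq_iff_iff]
    simp only [beq_iff_eq]
    push_cast
    omega

-- a shifted nonempty index list whose last element is already ≥ len - 1 fails lastIsLen
theorem lastIsLen_map_false (l : List Int) (hne : l ≠ [])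
    (hge : (l.length : Int) - 1 ≤ l.getLastD 0) : lastIsLen (l.map (· + 1)) = false := by
  rcases l with _ | ⟨a, l⟩
  · simp at hne
  · simp only [lastIsLen, List.map_cons, List.isEmpty_cons, List.length_cons, List.length_map,
      List.getLastD_cons, Bool.false_eq_true, if_false]
    rw [getLastD_map_add l a]
    simp only [List.length_cons, List.getLastD_cons] at hge
    simp only [beq_eq_false_iff_ne, ne_eq]
    push_cast at hge ⊢
    omega

-- A in state (foundOne arbitrary, EndOfOne = true): true iff no 1 remains
theorem solveLoopA_end (xs : List Int) (f : Bool) :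
    solveLoopA xs f true = decide ((1 : Int) ∉ xs) := by
  induction xs generalizing f with
  | nil => simp [solveLoopA]
  | cons x xs ih =>
    by_cases h : x = 1
    · simp [solveLoopA, h]
    · have hred : solveLoopA (x :: xs) f true = solveLoopA xs f true := by
        simp [solveLoopA, h]
      rw [hred, ih, decide_eq_decide]
      exact not_congr (one_mem_cons_ne x xs h).symm

-- A in state (foundOne = true, EndOfOne = false): the remaining 1s must form a prefix
theorem solveLoopA_found (xs : List Int) :
    solveLoopA xs true false = lastIsLen (gOnes xs 0) := by
  induction xs with
  | nil => simp [solveLoopA, gOnes, lastIsLen]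
  | cons x xs ih =>
    by_cases h : x = 1
    · have hred : solveLoopA (x :: xs) true false = solveLoopA xs true false := by
        simp [solveLoopA, h]
      rw [hred, ih, gOnes_cons_one x xs 0 h, gOnes_shift xs 0]
      exact (lastIsLen_zero_cons (gOnes xs 0)).symm
    · have hred : solveLoopA (x :: xs) true false = solveLoopA xs true true := by
        simp [solveLoopA, h]
      rw [hred, solveLoopA_end, gOnes_cons_ne x xs 0 h, gOnes_shift xs 0]
      by_cases hnil : gOnes xs 0 = []
      · have := (gOnes_nil_iff xs 0).mp hnil
        simp [hnil, lastIsLen, this]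
      · have hin : (1 : Int) ∈ xs := by
          by_contra hc
          exact hnil ((gOnes_nil_iff xs 0).mpr hc)
        have hge := gOnes_last_ge xs 0 0 hnil
        rw [lastIsLen_map_false (gOnes xs 0) hnil (by omega)]
        simp [hin]

theorem solveLoopA_main (xs : List Int) :
    solveLoopA xs false false = consecB (gOnes xs 0) := by
  induction xs with
  | nil => simp [solveLoopA, gOnes, consecB]
  | cons x xs ih =>
    by_cases h : x = 1
    · have hred : solveLoopA (x :: xs) false false = solveLoopA xs true false := by
        simp [solveLoopA, h]
      rw [hred, solveLoopA_found, gOnes_cons_one x xs 0 h, gOnes_shift xs 0]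
      exact (consecB_zero_cons (gOnes xs 0)).symm
    · have hred : solveLoopA (x :: xs) false false = solveLoopA xs false false := by
        simp [solveLoopA, h]
      rw [hred, ih, gOnes_cons_ne x xs 0 h, gOnes_shift xs 0]
      exact (consecB_shift (gOnes xs 0)).symm

theorem solve_alt_eq (nums : List Int) : solve_alt nums = consecB (gOnes nums 0) := by
  unfold solve_alt consecB
  rw [gOnes_eq_filter]

-- ===== VERDICT (by name: the statement is the Claim_ definition above) =====
theorem solve_spec : Claim_equal_solve := by
  intro nums _
  unfold Spec_solve
  rw [solve_alt_eq]
  exact solveLoopA_main nums
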